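-- pv_equiv track=rewrite | github.com/amangrwl30/ChatBotAI | DEMO1/backend/miscellaneous/google2.py | has_repetitive_phrases
-- ===== SOURCE A (Python) =====
-- def has_repetitive_phrases(text, n=3, threshold=2):
--     words = text.split()
--     ngrams = {}
--     for i in range(len(words) - n + 1):
--         phrase = " ".join(words[i:i+n])
--         ngrams[phrase] = ngrams.get(phrase, 0) + 1
--     for phrase, count in ngrams.items():
--         if count > threshold:
--             return True
--     return False
-- ===== SOURCE B (Python) =====
-- def has_repetitive_phrases(text, n=3, threshold=2):
--     words = text.split()
--     grams = sorted(" ".join(words[i:i+n]) for i in range(len(words) - n + 1))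
--     prev = None
--     run = 0
--     for g in grams:
--         run = run + 1 if g == prev else 1
--         if run > threshold:
--             return True
--         prev = g
--     return False
-- ===== Notes on version B (the rewrite author's own statement) =====
-- stated objective: alternative
-- what changed: B replaces A's hash-map counting (dict of n-gram counts then a scan of the items) with sort-then-group: it sorts the list of joined n-grams and makes one pass over adjacent elements maintaining the current run length, returning True as soon as a run exceeds threshold.
import Mathlib
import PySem

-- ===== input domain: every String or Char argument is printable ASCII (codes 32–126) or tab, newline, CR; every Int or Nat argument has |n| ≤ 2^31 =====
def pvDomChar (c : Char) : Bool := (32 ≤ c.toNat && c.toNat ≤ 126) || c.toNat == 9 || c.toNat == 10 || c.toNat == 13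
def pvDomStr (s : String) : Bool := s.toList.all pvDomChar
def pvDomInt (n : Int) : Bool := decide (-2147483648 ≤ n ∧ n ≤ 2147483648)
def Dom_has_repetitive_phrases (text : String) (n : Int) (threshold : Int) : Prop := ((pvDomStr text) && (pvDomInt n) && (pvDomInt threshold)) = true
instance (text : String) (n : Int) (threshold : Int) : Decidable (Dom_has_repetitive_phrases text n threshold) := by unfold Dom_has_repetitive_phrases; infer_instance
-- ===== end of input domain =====

-- B detects a repeated n-gram by sorting the n-gram list and scanning run lengths instead of counting in a dict (alternative algorithm, same cost class).

-- ===== PORT A =====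
def has_repetitive_phrases (text : String) (n : Int) (threshold : Int) : Bool :=
  let words := PySem.Str.split₀ text
  let ngrams : PySem.Dict String Int :=
    (PySem.List.pyRange 0 ((words.length : Int) - n + 1) 1).foldl
      (fun d i =>
        let phrase := PySem.Str.join " " (PySem.List.slice words (some i) (some (i + n)))
        d.insert phrase (d.getD phrase 0 + 1))
      PySem.Dict.empty
  ngrams.items.any (fun pc => decide (pc.2 > threshold))

-- ===== PORT B =====
-- the 'for g in grams' loop of Source B, with early return True
def pvScanRuns (threshold : Int) : List String → Option String → Int → Bool
  | [], _, _ => false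
  | g :: rest, prev, run =>
    let run' := if some g == prev then run + 1 else 1
    if run' > threshold then true else pvScanRuns threshold rest (some g) run'

def has_repetitive_phrases_alt (text : String) (n : Int) (threshold : Int) : Bool :=
  let words := PySem.Str.split₀ text
  let grams := ((PySem.List.pyRange 0 ((words.length : Int) - n + 1) 1).map
      (fun i => PySem.Str.join " " (PySem.List.slice words (some i) (some (i + n))))).mergeSort
    (fun a b => decide (a ≤ b))
  pvScanRuns threshold grams none 0

-- ===== PRECONDITION & SPEC =====
def Spec_has_repetitive_phrases (text : String) (n : Int) (threshold : Int) (out : Bool) : Prop := out = has_repetitive_phrases_alt text n threshold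
instance (text : String) (n : Int) (threshold : Int) (out : Bool) : Decidable (Spec_has_repetitive_phrases text n threshold out) := by unfold Spec_has_repetitive_phrases; infer_instance

-- ===== CLAIM (what is proved, stated in full; the proofs are below) =====
def Claim_equal_has_repetitive_phrases : Prop := ∀ (text : String) (n : Int) (threshold : Int), Dom_has_repetitive_phrases text n threshold → Spec_has_repetitive_phrases text n threshold (has_repetitive_phrases text n threshold)

-- ===== LEMMAS AND PROOFS =====

theorem scan_iff (t : Int) : ∀ (s : List String) (c : String) (run : Int),
    run ≤ t → (∀ x ∈ s, c ≤ x) → s.Pairwise (· ≤ ·) →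
    (pvScanRuns t s (some c) run = true ↔
      run + (s.count c : Int) > t ∨ ∃ p ∈ s, p ≠ c ∧ (s.count p : Int) > t) := by
  intro s
  induction s with
  | nil =>
    intro c run hrun _ _
    simp [pvScanRuns]; omega
  | cons x rest ih =>
    intro c run hrun hle hp
    have hxle : c ≤ x := hle x (List.mem_cons_self ..)
    have hrest : ∀ y ∈ rest, x ≤ y := fun y hy => (List.pairwise_cons.mp hp).1 y hy
    have hp' := (List.pairwise_cons.mp hp).2
    by_cases hxc : x = c
    · subst hxc
      simp only [pvScanRuns, beq_self_eq_true, if_true]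
      by_cases hbig : run + 1 > t
      · rw [if_pos hbig]
        constructor
        · intro _; left
          have : (0:Int) ≤ ((rest.count x : Int)) := by positivity
          simp [List.count_cons, beq_iff_eq]; omega
        · intro _; rfl
      · rw [if_neg hbig]
        rw [ih x (run+1) (by omega) hrest hp']
        constructor
        · rintro (h | ⟨p, hpmem, hpne, hpc⟩)
          · left; simp [List.count_cons, beq_iff_eq]; omega
          · right; exact ⟨p, List.mem_cons_of_mem _ hpmem, hpne, by
              have : x ≠ p := Ne.symm hpne
              simp [List.count_cons, beq_iff_eq, this]; omega⟩
        · rintro (h | ⟨p, hpmem, hpne, hpc⟩)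
          · left; simp [List.count_cons, beq_iff_eq] at h ⊢; omega
          · rcases List.mem_cons.mp hpmem with rfl | hm
            · exact absurd rfl hpne
            · right; exact ⟨p, hm, hpne, by simp [List.count_cons, beq_iff_eq, hpne, Ne.symm hpne] at hpc ⊢; omega⟩
    · -- x ≠ c; then c does not occur in x :: rest
      have hcx : c < x := lt_of_le_of_ne hxle (fun h => hxc h.symm)
      have hcnot : c ∉ x :: rest := by
        intro hmem
        rcases List.mem_cons.mp hmem with rfl | hm
        · exact hxc rfl
        · exact absurd (hrest c hm) (not_le.mpr hcx)
      have hcount0 : (x :: rest).count c = 0 := List.count_eq_zero.mpr hcnot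
      simp only [pvScanRuns]
      have hne : (some x == some c) = false := by
        simp [hxc]
      rw [hne]
      simp only [Bool.false_eq_true, if_false]
      by_cases hbig : (1:Int) > t
      · rw [if_pos hbig]
        constructor
        · intro _; right
          refine ⟨x, List.mem_cons_self .., hxc, ?_⟩
          have : 1 ≤ (x :: rest).count x := List.one_le_count_iff.mpr (List.mem_cons_self ..)
          omega
        · intro _; rfl
      · rw [if_neg hbig]
        rw [ih x 1 (by omega) hrest hp']
        constructor
        · rintro (h | ⟨p, hpmem, hpne, hpc⟩)
          · right
            refine ⟨x, List.mem_cons_self .., hxc, ?_⟩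
            simp [List.count_cons, beq_iff_eq] at h ⊢; omega
          · right
            have hpc' : p ≠ c := by
              intro h; subst h
              exact hcnot (List.mem_cons_of_mem _ hpmem)
            exact ⟨p, List.mem_cons_of_mem _ hpmem, hpc', by simp [List.count_cons, beq_iff_eq, hpne, Ne.symm hpne] at hpc ⊢; omega⟩
        · rintro (h | ⟨p, hpmem, hpne, hpc⟩)
          · rw [hcount0] at h; omega
          · rcases List.mem_cons.mp hpmem with rfl | hm
            · left; simp [List.count_cons, beq_iff_eq] at hpc ⊢; omega
            · by_cases hpx : p = x
              · subst hpx; left; simp [List.count_cons, beq_iff_eq] at hpc ⊢; omega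
              · right; exact ⟨p, hm, hpx, by simp [List.count_cons, beq_iff_eq, hpx, Ne.symm hpx] at hpc ⊢; omega⟩

theorem scan_sorted_iff (t : Int) (s : List String) (hp : s.Pairwise (· ≤ ·)) :
    (pvScanRuns t s none 0 = true ↔ ∃ p ∈ s, (s.count p : Int) > t) := by
  cases s with
  | nil => simp [pvScanRuns]
  | cons x rest =>
    have hrest := (List.pairwise_cons.mp hp).1
    have hp' := (List.pairwise_cons.mp hp).2
    have hb : (some x == (none : Option String)) = false := rfl
    simp only [pvScanRuns, hb, Bool.false_eq_true, if_false]
    by_cases hbig : (1:Int) > t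
    · rw [if_pos hbig]
      constructor
      · intro _
        refine ⟨x, List.mem_cons_self .., ?_⟩
        have : 1 ≤ (x :: rest).count x := List.one_le_count_iff.mpr (List.mem_cons_self ..)
        omega
      · intro _; rfl
    · rw [if_neg hbig]
      rw [scan_iff t rest x 1 (by omega) hrest hp']
      constructor
      · rintro (h | ⟨p, hm, hpne, hpc⟩)
        · exact ⟨x, List.mem_cons_self .., by simp [List.count_cons, beq_iff_eq] at h ⊢; omega⟩
        · exact ⟨p, List.mem_cons_of_mem _ hm, by
            simp [List.count_cons, beq_iff_eq, hpne, Ne.symm hpne] at hpc ⊢; omega⟩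
      · rintro ⟨p, hm, hpc⟩
        rcases List.mem_cons.mp hm with rfl | hm'
        · left; simp [List.count_cons, beq_iff_eq] at hpc ⊢; omega
        · by_cases hpx : p = x
          · subst hpx; left; simp [List.count_cons, beq_iff_eq] at hpc ⊢; omega
          · right
            exact ⟨p, hm', hpx, by simp [List.count_cons, beq_iff_eq, hpx, Ne.symm hpx] at hpc ⊢; omega⟩

theorem items_any_counter (l : List String) (t : Int) :
    ((l.foldl (fun d x => d.insert x (d.getD x 0 + 1)) PySem.Dict.empty).items.any
      (fun pc => decide (pc.2 > t)) = true) ↔ ∃ p ∈ l, (l.count p : Int) > t := by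
  have h : l.foldl (fun d x => d.insert x (d.getD x 0 + 1)) PySem.Dict.empty
      = PySem.Dict.counter l := rfl
  rw [h, PySem.Dict.items_counter]
  simp only [List.any_map, List.any_eq_true, Function.comp, decide_eq_true_eq]
  constructor
  · rintro ⟨k, hk, hgt⟩; exact ⟨k, (PySem.Set.mem_ofList _ _).mp hk, hgt⟩
  · rintro ⟨k, hk, hgt⟩; exact ⟨k, (PySem.Set.mem_ofList _ _).mpr hk, hgt⟩

theorem items_any_counter' (f : Int → String) (r : List Int) (t : Int) :
    ((r.foldl (fun d i => d.insert (f i) (d.getD (f i) 0 + 1)) (PySem.Dict.empty : PySem.Dict String Int)).items.any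
      (fun pc => decide (pc.2 > t)) = true) ↔ ∃ p ∈ r.map f, ((r.map f).count p : Int) > t := by
  have h : r.foldl (fun d i => d.insert (f i) (d.getD (f i) 0 + 1)) (PySem.Dict.empty : PySem.Dict String Int)
      = (r.map f).foldl (fun d x => d.insert x (d.getD x 0 + 1)) PySem.Dict.empty :=
    by rw [List.foldl_map]
  rw [h, items_any_counter]

theorem main_eq (text : String) (n : Int) (threshold : Int) :
    has_repetitive_phrases text n threshold = has_repetitive_phrases_alt text n threshold := by
  simp only [has_repetitive_phrases, has_repetitive_phrases_alt]
  rw [Bool.eq_iff_iff]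
  set phrases := (PySem.List.pyRange 0 (((PySem.Str.split₀ text).length : Int) - n + 1) 1).map
      (fun i => PySem.Str.join " " (PySem.List.slice (PySem.Str.split₀ text) (some i) (some (i + n)))) with hph
  have hperm : (phrases.mergeSort (fun a b => decide (a ≤ b))).Perm phrases :=
    List.mergeSort_perm phrases _
  have hpw : (phrases.mergeSort (fun a b => decide (a ≤ b))).Pairwise (· ≤ ·) := by
    have h := List.pairwise_mergeSort (le := fun a b : String => decide (a ≤ b))
      (by intro a b c hab hbc; simp at *; exact le_trans hab hbc)
      (by intro a b; simp [le_total]) phrases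
    simpa using h
  rw [hph] at *
  rw [items_any_counter' _ _ threshold, scan_sorted_iff threshold _ hpw]
  constructor
  · rintro ⟨p, hm, hc⟩
    exact ⟨p, hperm.mem_iff.mpr hm, by rw [hperm.count_eq]; exact hc⟩
  · rintro ⟨p, hm, hc⟩
    exact ⟨p, hperm.mem_iff.mp hm, by rw [← hperm.count_eq]; exact hc⟩

-- ===== VERDICT (by name: the statement is the Claim_ definition above) =====
theorem has_repetitive_phrases_spec : Claim_equal_has_repetitive_phrases := by
  intro text n threshold _
  exact main_eq text n threshold
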